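-- pv_equiv track=rewrite | github.com/nsmaciej/adventofcode | 2019/day22.py | apply
-- ===== SOURCE A (Python) =====
-- def apply(a, b, k):
--     # Sadly had to take an intense hint for this.
--     if k == 1:
--         return a, b
--     elif k % 2 == 0:
--         return apply((a * a) % n, (a * b + b) % n, k // 2)
--     else:
--         c, d = apply(a, b, k - 1)
--         return (a * c) % n, (a * d + b) % n
--
-- n = 119315717514047
-- ===== SOURCE B (Python) =====
-- n = 119315717514047
--
-- def apply(a, b, k):
--     # iterative binary exponentiation of the affine map x -> a*x + b (mod n)
--     ra, rb = 1, 0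
--     ba, bb = a, b
--     while k > 0:
--         if k & 1:
--             ra, rb = (ra * ba) % n, (ra * bb + rb) % n
--         ba, bb = (ba * ba) % n, (ba * bb + bb) % n
--         k >>= 1
--     return ra, rb
-- ===== Notes on version B (the rewrite author's own statement) =====
-- stated objective: alternative
-- what changed: Replaced A's recursive halve/decrement squaring of the affine map with an iterative binary-exponentiation while-loop that keeps an explicit accumulator (ra,rb) and squares the base (ba,bb) each round.
-- intended difference: For k=1 with a<0 or b<0 A returns the raw unreduced pair (a,b) while B returns the canonical residues (a%n, b%n); B's value is intended since the function computes an affine map mod n and A itself returns reduced residues for every k>=2. — e.g. on apply(-1, 0, 1): A returns (-1, 0), B returns (119315717514046, 0)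
import Mathlib
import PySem

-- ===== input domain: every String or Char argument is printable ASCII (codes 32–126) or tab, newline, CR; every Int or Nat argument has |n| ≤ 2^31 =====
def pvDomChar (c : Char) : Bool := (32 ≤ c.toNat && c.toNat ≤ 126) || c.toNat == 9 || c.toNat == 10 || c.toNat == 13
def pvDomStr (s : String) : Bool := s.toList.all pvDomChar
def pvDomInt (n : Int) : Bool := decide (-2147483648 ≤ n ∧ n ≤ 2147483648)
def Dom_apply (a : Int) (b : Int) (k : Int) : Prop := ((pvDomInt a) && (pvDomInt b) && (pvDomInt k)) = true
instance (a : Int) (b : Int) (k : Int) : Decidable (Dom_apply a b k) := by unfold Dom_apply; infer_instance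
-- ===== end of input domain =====

-- B replaces A's recursive halve/decrement squaring of the affine map by an iterative
-- binary-exponentiation loop with an explicit accumulator (objective: alternative decomposition).

-- the module-level constant n
def pvN : Int := 119315717514047

-- ===== PORT A =====
-- fuel = k.toNat + 1 bounds the recursion depth; Python's apply never returns for k ≤ 0
-- (unbounded recursion), so that branch — like fuel 0 — is unreachable under Pre_apply
def applyFuel : Nat → Int → Int → Int → Int × Int
  | 0, _, _, _ => (0, 0)
  | f + 1, a, b, k =>
    if k ≤ 0 then (0, 0)
    else if k = 1 then (a, b)
    else if PySem.Int.mod k 2 = 0 then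
      applyFuel f (PySem.Int.mod (a * a) pvN) (PySem.Int.mod (a * b + b) pvN)
        (PySem.Int.floordiv k 2)
    else
      let cd := applyFuel f a b (k - 1)
      (PySem.Int.mod (a * cd.1) pvN, PySem.Int.mod (a * cd.2 + b) pvN)

def apply (a : Int) (b : Int) (k : Int) : Int × Int :=
  applyFuel (k.toNat + 1) a b k

-- ===== PORT B =====
-- the while-loop of Source B, fuel = number of remaining iterations + 1;
-- Python's 'k & 1' = k % 2 and 'k >>= 1' = k // 2 (exact for all ints)
def altLoopFuel : Nat → Int → Int → Int → Int → Int → Int × Int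
  | 0, _, _, _, _, _ => (0, 0)
  | f + 1, ra, rb, ba, bb, k =>
    if 0 < k then
      let acc := if PySem.Int.mod k 2 = 1 then
          (PySem.Int.mod (ra * ba) pvN, PySem.Int.mod (ra * bb + rb) pvN)
        else (ra, rb)
      altLoopFuel f acc.1 acc.2 (PySem.Int.mod (ba * ba) pvN) (PySem.Int.mod (ba * bb + bb) pvN)
        (PySem.Int.floordiv k 2)
    else (ra, rb)

def apply_alt (a : Int) (b : Int) (k : Int) : Int × Int :=
  altLoopFuel (k.toNat + 1) 1 0 a b k

-- ===== PRECONDITION & SPEC =====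
-- Pre_ excludes k ≤ 0, on which Python's apply recurses forever (no value is returned).
def Pre_apply (a : Int) (b : Int) (k : Int) : Prop := 1 ≤ k
instance (a : Int) (b : Int) (k : Int) : Decidable (Pre_apply a b k) := by unfold Pre_apply; infer_instance
def pvWitness_apply : Int × Int × Int := (2, 3, 5)

-- On k = 1 with a negative coefficient A returns the raw unreduced pair (a, b), while B returns
-- the canonical residues (a % n, b % n); B's is the intended value since the function's purpose
-- is an affine map mod n and A itself returns reduced residues for every k ≥ 2.
def D_apply (a : Int) (b : Int) (k : Int) : Prop := k = 1 ∧ (a < 0 ∨ b < 0)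
instance (a : Int) (b : Int) (k : Int) : Decidable (D_apply a b k) := by unfold D_apply; infer_instance

def Spec_apply (a : Int) (b : Int) (k : Int) (out : Int × Int) : Prop := ¬ D_apply a b k → out = apply_alt a b k
instance (a : Int) (b : Int) (k : Int) (out : Int × Int) : Decidable (Spec_apply a b k out) := by unfold Spec_apply; infer_instance

def pvDiffWitness_apply : Int × Int × Int := (-1, 0, 1)
def pvDiffWitnessOut_apply : (Int × Int) × (Int × Int) := ((-1, 0), (119315717514046, 0))

-- ===== CLAIM (what is proved, stated in full; the proofs are below) =====
def Claim_unchanged_apply : Prop := ∀ (a : Int) (b : Int) (k : Int), Dom_apply a b k → Pre_apply a b k → Spec_apply a b k (apply a b k)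
def Claim_changed_apply : Prop := Dom_apply (pvDiffWitness_apply.1) (pvDiffWitness_apply.2.1) (pvDiffWitness_apply.2.2) ∧ Pre_apply (pvDiffWitness_apply.1) (pvDiffWitness_apply.2.1) (pvDiffWitness_apply.2.2) ∧ D_apply (pvDiffWitness_apply.1) (pvDiffWitness_apply.2.1) (pvDiffWitness_apply.2.2) ∧ apply (pvDiffWitness_apply.1) (pvDiffWitness_apply.2.1) (pvDiffWitness_apply.2.2) = pvDiffWitnessOut_apply.1 ∧ apply_alt (pvDiffWitness_apply.1) (pvDiffWitness_apply.2.1) (pvDiffWitness_apply.2.2) = pvDiffWitnessOut_apply.2 ∧ pvDiffWitnessOut_apply.1 ≠ pvDiffWitnessOut_apply.2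
def Claim_exact_apply : Prop := ∀ (a : Int) (b : Int) (k : Int), Dom_apply a b k → Pre_apply a b k → D_apply a b k → apply a b k ≠ apply_alt a b k

-- ===== LEMMAS AND PROOFS =====

-- geometric sum 1 + a + a² + … + a^(m-1): the constant coefficient of the m-fold composition
def gsum (a : Int) : Nat → Int
  | 0 => 0
  | m + 1 => 1 + a * gsum a m

lemma gsum_even (a : Int) (m : Nat) : gsum a (2 * m) = (1 + a) * gsum (a * a) m := by
  induction m with
  | zero => simp [gsum]
  | succ m ih =>
    have h : 2 * (m + 1) = 2 * m + 1 + 1 := by ring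
    rw [h]
    simp only [gsum, ih]
    ring

lemma gsum_odd (a : Int) (m : Nat) : gsum a (2 * m + 1) = 1 + a * (1 + a) * gsum (a * a) m := by
  simp only [gsum, gsum_even]; ring

lemma pmod_eq (x : Int) : PySem.Int.mod x pvN = x % pvN :=
  PySem.Int.mod_eq_emod_of_pos (by norm_num [pvN])

lemma modeq_emod (x : Int) : Int.ModEq pvN (x % pvN) x :=
  Int.emod_emod_of_dvd x dvd_rfl

lemma gsum_modeq {x y : Int} (h : Int.ModEq pvN x y) (m : Nat) :
    Int.ModEq pvN (gsum x m) (gsum y m) := by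
  induction m with
  | zero => rfl
  | succ m ih =>
    simp only [gsum]
    exact (h.mul ih).add_left 1

lemma applyFuel_one (f : Nat) (a b : Int) (hf : 1 ≤ f) : applyFuel f a b 1 = (a, b) := by
  obtain ⟨g, rfl⟩ : ∃ g, f = g + 1 := ⟨f - 1, by omega⟩
  rw [applyFuel, if_neg (by norm_num : ¬ (1:Int) ≤ 0), if_pos rfl]

-- characterisation of A on k ≥ 2: reduced coefficients of the k-fold composition
lemma applyFuel_char : ∀ (f : Nat) (a b k : Int), k.toNat < f → 2 ≤ k →
    applyFuel f a b k = ((a ^ k.toNat) % pvN, (b * gsum a k.toNat) % pvN) := by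
  intro f
  induction f with
  | zero => intro a b k hm hk; omega
  | succ f ih =>
    intro a b k hm hk
    rw [applyFuel, if_neg (by omega : ¬ k ≤ 0), if_neg (by omega : ¬ k = 1)]
    rw [PySem.Int.mod_eq_emod_of_pos (a := k) (by norm_num),
        PySem.Int.floordiv_eq_ediv_of_pos (a := k) (by norm_num)]
    by_cases hpar : k % 2 = 0
    · rw [if_pos hpar]
      set m2 := (k / 2).toNat with hm2
      have hkt : k.toNat = 2 * m2 := by omega
      by_cases h1 : k / 2 = 1
      -- k = 2: the recursive call lands in the k = 1 base case
      · rw [h1, applyFuel_one f _ _ (by omega)]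
        have hk2 : k.toNat = 2 := by omega
        simp only [pmod_eq, hk2, Prod.mk.injEq]
        refine ⟨?_, ?_⟩
        · congr 1; ring
        · congr 1; simp [gsum]; ring
      · have hge : 2 ≤ k / 2 := by omega
        rw [ih _ _ _ (by omega) hge]
        simp only [pmod_eq, Prod.mk.injEq]
        refine ⟨?_, ?_⟩
        · have h : Int.ModEq pvN ((a * a % pvN) ^ m2) (a ^ k.toNat) := by
            calc (a * a % pvN) ^ m2 ≡ (a * a) ^ m2 [ZMOD pvN] := (modeq_emod _).pow m2
              _ = a ^ k.toNat := by rw [hkt]; ring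
          exact h
        · have h : Int.ModEq pvN ((a * b + b) % pvN * gsum (a * a % pvN) m2) (b * gsum a k.toNat) := by
            calc (a * b + b) % pvN * gsum (a * a % pvN) m2
                ≡ (a * b + b) * gsum (a * a) m2 [ZMOD pvN] :=
                  (modeq_emod _).mul (gsum_modeq (modeq_emod _) m2)
              _ = b * gsum a k.toNat := by rw [hkt, gsum_even]; ring
          exact h
    · rw [if_neg hpar]
      rw [ih _ _ _ (by omega) (by omega)]
      simp only [pmod_eq, Prod.mk.injEq]
      set j := (k - 1).toNat with hj
      have hkt : k.toNat = j + 1 := by omega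
      refine ⟨?_, ?_⟩
      · have h : Int.ModEq pvN (a * (a ^ j % pvN)) (a ^ k.toNat) := by
          calc a * (a ^ j % pvN) ≡ a * a ^ j [ZMOD pvN] := (modeq_emod _).mul_left a
            _ = a ^ k.toNat := by rw [hkt]; ring
        exact h
      · have h : Int.ModEq pvN (a * (b * gsum a j % pvN) + b) (b * gsum a k.toNat) := by
          calc a * (b * gsum a j % pvN) + b
              ≡ a * (b * gsum a j) + b [ZMOD pvN] := ((modeq_emod _).mul_left a).add_right b
            _ = b * gsum a k.toNat := by rw [hkt]; simp only [gsum]; ring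
        exact h

lemma altLoopFuel_zero (f : Nat) (ra rb ba bb : Int) (hf : 1 ≤ f) :
    altLoopFuel f ra rb ba bb 0 = (ra, rb) := by
  obtain ⟨g, rfl⟩ : ∃ g, f = g + 1 := ⟨f - 1, by omega⟩
  rw [altLoopFuel, if_neg (by norm_num : ¬ (0:Int) < 0)]

-- characterisation of B's loop on k ≥ 1
lemma altLoopFuel_char : ∀ (f : Nat) (ra rb ba bb k : Int), k.toNat < f → 1 ≤ k →
    altLoopFuel f ra rb ba bb k =
      ((ra * ba ^ k.toNat) % pvN, (ra * bb * gsum ba k.toNat + rb) % pvN) := by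
  intro f
  induction f with
  | zero => intro ra rb ba bb k hm hk; omega
  | succ f ih =>
    intro ra rb ba bb k hm hk
    rw [altLoopFuel, if_pos (by omega : (0:Int) < k)]
    rw [PySem.Int.mod_eq_emod_of_pos (a := k) (by norm_num),
        PySem.Int.floordiv_eq_ediv_of_pos (a := k) (by norm_num)]
    set m2 := (k / 2).toNat with hm2
    by_cases hpar : k % 2 = 1
    · rw [if_pos hpar]
      have hkt : k.toNat = 2 * m2 + 1 := by omega
      by_cases h0 : k = 1
      -- k = 1: the recursive call has k = 0 and returns the accumulator
      · rw [h0, show (1:Int) / 2 = 0 from rfl, altLoopFuel_zero f _ _ _ _ (by omega)]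
        have h1 : (1:Int).toNat = 1 := rfl
        simp only [pmod_eq, h1, Prod.mk.injEq]
        refine ⟨by congr 1; try ring, by congr 1; simp [gsum]; try ring⟩
      · have hge : 1 ≤ k / 2 := by omega
        rw [ih _ _ _ _ _ (by omega) hge]
        simp only [pmod_eq, Prod.mk.injEq]
        refine ⟨?_, ?_⟩
        · have h : Int.ModEq pvN ((ra * ba) % pvN * (ba * ba % pvN) ^ m2)
              (ra * ba ^ k.toNat) := by
            calc (ra * ba) % pvN * (ba * ba % pvN) ^ m2
                ≡ (ra * ba) * (ba * ba) ^ m2 [ZMOD pvN] :=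
                  (modeq_emod _).mul ((modeq_emod _).pow m2)
              _ = ra * ba ^ k.toNat := by rw [hkt]; ring
          exact h
        · have h : Int.ModEq pvN
              ((ra * ba) % pvN * ((ba * bb + bb) % pvN) * gsum (ba * ba % pvN) m2 + (ra * bb + rb) % pvN)
              (ra * bb * gsum ba k.toNat + rb) := by
            calc (ra * ba) % pvN * ((ba * bb + bb) % pvN) * gsum (ba * ba % pvN) m2 + (ra * bb + rb) % pvN
                ≡ (ra * ba) * (ba * bb + bb) * gsum (ba * ba) m2 + (ra * bb + rb) [ZMOD pvN] :=
                  (((modeq_emod _).mul (modeq_emod _)).mul (gsum_modeq (modeq_emod _) m2)).add (modeq_emod _)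
              _ = ra * bb * gsum ba k.toNat + rb := by rw [hkt, gsum_odd]; ring
          exact h
    · rw [if_neg hpar]
      have hkt : k.toNat = 2 * m2 := by omega
      have hge : 1 ≤ k / 2 := by omega
      rw [ih _ _ _ _ _ (by omega) hge]
      simp only [pmod_eq, Prod.mk.injEq]
      refine ⟨?_, ?_⟩
      · have h : Int.ModEq pvN (ra * (ba * ba % pvN) ^ m2) (ra * ba ^ k.toNat) := by
          calc ra * (ba * ba % pvN) ^ m2 ≡ ra * (ba * ba) ^ m2 [ZMOD pvN] :=
                ((modeq_emod _).pow m2).mul_left ra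
            _ = ra * ba ^ k.toNat := by rw [hkt]; ring
        exact h
      · have h : Int.ModEq pvN (ra * ((ba * bb + bb) % pvN) * gsum (ba * ba % pvN) m2 + rb)
            (ra * bb * gsum ba k.toNat + rb) := by
          calc ra * ((ba * bb + bb) % pvN) * gsum (ba * ba % pvN) m2 + rb
              ≡ ra * (ba * bb + bb) * gsum (ba * ba) m2 + rb [ZMOD pvN] :=
                (((modeq_emod _).mul_left ra).mul (gsum_modeq (modeq_emod _) m2)).add_right rb
            _ = ra * bb * gsum ba k.toNat + rb := by rw [hkt, gsum_even]; ring
        exact h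

lemma apply_char (a b k : Int) (hk : 2 ≤ k) :
    apply a b k = ((a ^ k.toNat) % pvN, (b * gsum a k.toNat) % pvN) :=
  applyFuel_char (k.toNat + 1) a b k (by omega) hk

lemma alt_char (a b k : Int) (hk : 1 ≤ k) :
    apply_alt a b k = ((a ^ k.toNat) % pvN, (b * gsum a k.toNat) % pvN) := by
  rw [apply_alt, altLoopFuel_char (k.toNat + 1) 1 0 a b k (by omega) hk]
  simp only [Prod.mk.injEq]
  refine ⟨by congr 1; ring, by congr 1; ring⟩

lemma apply_one (a b : Int) : apply a b 1 = (a, b) :=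
  applyFuel_one _ a b (by norm_num)

lemma alt_one (a b : Int) : apply_alt a b 1 = (a % pvN, b % pvN) := by
  rw [alt_char a b 1 le_rfl]
  have h1 : (1:Int).toNat = 1 := rfl
  simp only [h1, Prod.mk.injEq]
  refine ⟨by congr 1; ring, by congr 1; simp [gsum]⟩

-- ===== VERDICT (by name: the statement is the Claim_ definition above) =====
theorem apply_spec : Claim_unchanged_apply := by
  unfold Claim_unchanged_apply
  intro a b k hdom hpre hnd
  by_cases hk1 : k = 1
  · subst hk1
    have hab : 0 ≤ a ∧ 0 ≤ b := by
      by_contra h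
      exact hnd ⟨rfl, by omega⟩
    simp only [Dom_apply, pvDomInt, Bool.and_eq_true, decide_eq_true_eq] at hdom
    rw [apply_one, alt_one,
        Int.emod_eq_of_lt hab.1 (by simp only [pvN]; omega),
        Int.emod_eq_of_lt hab.2 (by simp only [pvN]; omega)]
  · have hk2 : 2 ≤ k := by
      have : 1 ≤ k := hpre
      omega
    rw [apply_char a b k hk2, alt_char a b k (by omega)]

theorem apply_changed : Claim_changed_apply := by
  unfold Claim_changed_apply
  refine ⟨by decide, by decide, by decide, ?_, ?_, by decide⟩
  · show apply (-1) 0 1 = (-1, 0)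
    rw [apply_one]
  · show apply_alt (-1) 0 1 = (119315717514046, 0)
    rw [alt_one]
    decide

theorem apply_tight : Claim_exact_apply := by
  unfold Claim_exact_apply
  intro a b k _hdom _hpre hD
  obtain ⟨hk1, hab⟩ := hD
  subst hk1
  rw [apply_one, alt_one]
  intro heq
  simp only [Prod.mk.injEq] at heq
  obtain ⟨ha, hb⟩ := heq
  have hna : 0 ≤ a % pvN := Int.emod_nonneg a (by norm_num [pvN])
  have hnb : 0 ≤ b % pvN := Int.emod_nonneg b (by norm_num [pvN])
  omega
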